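-- pv_equiv track=rewrite | github.com/jimizip/algorithm-study | 백준/Gold/2240. 자두나무/자두나무.py | max_plums
-- ===== SOURCE A (Python) =====
-- def max_plums(T, W, plums):
--     # T+1 x W+1 크기의 2차원 DP 테이블 생성
--     dp = [[0] * (W + 1) for _ in range(T + 1)]
--
--     for t in range(1, T + 1):
--         # 1 또는 2
--         plum = plums[t - 1]
--
--         for w in range(W + 1):
--             # 현재 위치 (w가 짝수면 1번 나무, 홀수면 2번 나무)
--             current_tree = 1 if w % 2 == 0 else 2
--
--             # 이동하지 않는 경우
--             dp[t][w] = dp[t-1][w]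
--
--             # 이동하는 경우 (w > 0일 때만 가능)
--             if w > 0:
--                 dp[t][w] = max(dp[t][w], dp[t-1][w - 1])
--
--             # 현재 나무에서 자두를 받을 수 있는 경우
--             if plum == current_tree:
--                 dp[t][w] += 1
--
--     # 마지막 시간에서의 최대값 반환
--     return max(dp[T])
-- ===== SOURCE B (Python) =====
-- def max_plums(T, W, plums):
--     # Segment DP over the number of moves with prefix counts and running maxima:
--     # dp[t][w] = P_w[t] + max_{t' < t} (dp[t'][w-1] - P_w[t']), where P_w is the
--     # prefix count of plums falling at the tree of parity w; the inner max is a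
--     # running best, no neighbor-max recurrence.
--     P1 = [0]
--     P2 = [0]
--     c1 = 0
--     c2 = 0
--     for t in range(T):
--         if plums[t] == 1:
--             c1 += 1
--         elif plums[t] == 2:
--             c2 += 1
--         P1.append(c1)
--         P2.append(c2)
--     f = P1[:]
--     ans = f[T]
--     for w in range(1, W + 1):
--         P = P2 if w % 2 else P1
--         g = [0]
--         best = f[0] - P[0]
--         for t in range(1, T + 1):
--             g.append(P[t] + best)
--             nb = f[t] - P[t]
--             if nb > best:
--                 best = nb
--         ans = max(ans, g[T])
--         f = g
--     return ans
-- ===== Notes on version B (the rewrite author's own statement) =====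
-- stated objective: faster
-- what changed: A fills a bottom-up (T+1)x(W+1) table with the neighbor-max recurrence max(dp[t-1][w], dp[t-1][w-1]) plus a per-cell tree-parity test; B is a segment DP over the number of moves using prefix counts of each tree and a running maximum: dp[t][w] = P_w[t] + max_{t'<t}(dp[t'][w-1] - P_w[t']), so the inner loop is one add and one compare with no list-of-lists.
import Mathlib
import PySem

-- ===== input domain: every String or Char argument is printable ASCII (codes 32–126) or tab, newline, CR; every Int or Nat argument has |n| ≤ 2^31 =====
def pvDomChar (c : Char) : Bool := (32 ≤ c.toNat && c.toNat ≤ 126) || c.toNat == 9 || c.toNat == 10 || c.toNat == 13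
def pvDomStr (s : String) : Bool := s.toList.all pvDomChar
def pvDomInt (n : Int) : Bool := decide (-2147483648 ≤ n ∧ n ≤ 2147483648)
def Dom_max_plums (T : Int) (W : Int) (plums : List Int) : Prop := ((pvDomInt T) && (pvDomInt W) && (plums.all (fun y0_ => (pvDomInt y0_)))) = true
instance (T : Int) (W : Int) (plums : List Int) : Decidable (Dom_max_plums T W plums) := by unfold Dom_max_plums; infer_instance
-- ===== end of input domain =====

-- B replaces A's bottom-up neighbor-max table by a segment DP over the number of
-- moves with prefix tree-counts and running maxima; same O(T*W), cheaper inner loop.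

-- ===== PORT A =====
def max_plums (T : Int) (W : Int) (plums : List Int) : Int :=
  let zrow : List Int := List.replicate (W + 1).toNat 0
  let dp0 : List (List Int) := List.replicate (T + 1).toNat zrow
  let dp := (PySem.List.pyRange 1 (T + 1) 1).foldl (fun dp t =>
    let plum := (PySem.List.pyGet? plums (t - 1)).getD 0
    let prev := (PySem.List.pyGet? dp (t - 1)).getD []
    let row := (PySem.List.pyRange 0 (W + 1) 1).foldl (fun row w =>
      let current_tree : Int := if w % 2 == 0 then 1 else 2
      let v := (PySem.List.pyGet? prev w).getD 0
      let v := if w > 0 then max v ((PySem.List.pyGet? prev (w - 1)).getD 0) else v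
      let v := if plum == current_tree then v + 1 else v
      row ++ [v]) []
    dp.set t.toNat row) dp0
  (PySem.List.max? ((PySem.List.pyGet? dp T).getD []) (fun x => x)).getD 0

-- ===== PORT B =====
def max_plums_alt (T : Int) (W : Int) (plums : List Int) : Int :=
  let pre := (PySem.List.pyRange 0 T 1).foldl
    (fun (st : List Int × List Int × Int × Int) t =>
      let p := (PySem.List.pyGet? plums t).getD 0
      let c1 := if p == 1 then st.2.2.1 + 1 else st.2.2.1
      let c2 := if p == 1 then st.2.2.2 else if p == 2 then st.2.2.2 + 1 else st.2.2.2
      (st.1 ++ [c1], st.2.1 ++ [c2], c1, c2))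
    ([0], [0], 0, 0)
  let P1 := pre.1
  let P2 := pre.2.1
  let f0 := P1
  let ans0 := (PySem.List.pyGet? f0 T).getD 0
  let res := (PySem.List.pyRange 1 (W + 1) 1).foldl
    (fun (st : Int × List Int) w =>
      let P := if w % 2 != 0 then P2 else P1
      let inner := (PySem.List.pyRange 1 (T + 1) 1).foldl
        (fun (st2 : List Int × Int) t =>
          let g := st2.1 ++ [(PySem.List.pyGet? P t).getD 0 + st2.2]
          let nb := (PySem.List.pyGet? st.2 t).getD 0 - (PySem.List.pyGet? P t).getD 0
          (g, if nb > st2.2 then nb else st2.2))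
        ([0], (PySem.List.pyGet? st.2 0).getD 0 - (PySem.List.pyGet? P 0).getD 0)
      let g := inner.1
      (max st.1 ((PySem.List.pyGet? g T).getD 0), g))
    (ans0, f0)
  res.1

-- ===== PRECONDITION & SPEC =====
-- Pre_ excludes exactly the inputs where Python A raises: T < 0 (IndexError on dp[T]),
-- W < 0 (max of an empty row, ValueError), T > len(plums) (IndexError on plums[t-1]).
def Pre_max_plums (T : Int) (W : Int) (plums : List Int) : Prop :=
  0 ≤ T ∧ 0 ≤ W ∧ T ≤ (plums.length : Int)
instance (T : Int) (W : Int) (plums : List Int) : Decidable (Pre_max_plums T W plums) := by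
  unfold Pre_max_plums; infer_instance

def pvWitness_max_plums : Int × Int × List Int := (2, 1, [1, 2])

def Spec_max_plums (T : Int) (W : Int) (plums : List Int) (out : Int) : Prop := out = max_plums_alt T W plums
instance (T : Int) (W : Int) (plums : List Int) (out : Int) : Decidable (Spec_max_plums T W plums out) := by unfold Spec_max_plums; infer_instance

-- ===== CLAIM (what is proved, stated in full; the proofs are below) =====
def Claim_equal_max_plums : Prop := ∀ (T : Int) (W : Int) (plums : List Int), Dom_max_plums T W plums → Pre_max_plums T W plums → Spec_max_plums T W plums (max_plums T W plums)

-- ===== LEMMAS AND PROOFS =====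

-- abstract forward row (what A's inner loop computes): carry c = previous element
def fgo (p t c : Int) : List Int → List Int
  | [] => []
  | a :: u => (max a c + (if p == t then 1 else 0)) :: fgo p (3 - t) a u

def arow (p : Int) (u : List Int) : List Int := fgo p 1 (u.headD 0) u

def maxD (u : List Int) : Int := (PySem.List.max? u (fun x => x)).getD 0

theorem length_fgo (p t c : Int) (u : List Int) : (fgo p t c u).length = u.length := by
  induction u generalizing t c with
  | nil => simp [fgo]
  | cons a u ih => simp [fgo, ih]

theorem fgo_getD (p t c : Int) (u : List Int) (i : Nat) (h : i < u.length) :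
    (fgo p t c u).getD i 0 =
      max (u.getD i 0) (if i = 0 then c else u.getD (i - 1) 0) +
        (if p == (if i % 2 = 0 then t else 3 - t) then 1 else 0) := by
  induction u generalizing t c i with
  | nil => simp at h
  | cons a u ih =>
    cases i with
    | zero => simp [fgo]
    | succ j =>
      have hj : j < u.length := by simpa using h
      simp only [fgo, List.getD_cons_succ]
      rw [ih (3 - t) a j hj]
      have h3 : 3 - (3 - t) = t := by ring
      rw [h3]
      have hpar : ((j + 1) % 2 = 0) = (¬ (j % 2 = 0)) := by
        simp only [eq_iff_iff]; omega
      cases j with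
      | zero => simp
      | succ k =>
        simp only [hpar]
        have : (k + 1) % 2 = 0 ∨ (k + 1) % 2 = 1 := Nat.mod_two_eq_zero_or_one _
        rcases this with hk | hk <;> simp [hk]

theorem maxD_cons (a : Int) (t : List Int) : maxD (a :: t) = t.foldl max a := by
  simp [maxD, PySem.List.max?_id_cons]

theorem length_foldl_arow (ps : List Int) : ∀ (u : List Int),
    (ps.foldl (fun u p => arow p u) u).length = u.length := by
  induction ps with
  | nil => intro u; rfl
  | cons p ps ih =>
    intro u
    simp only [List.foldl_cons]
    rw [ih (arow p u), arow, length_fgo]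

-- the value A's inner loop computes at position w
def aval (plum : Int) (prev : List Int) (w : Int) : Int :=
  if plum == (if w % 2 == 0 then 1 else 2) then
    (if w > 0 then max ((PySem.List.pyGet? prev w).getD 0)
        ((PySem.List.pyGet? prev (w - 1)).getD 0)
      else (PySem.List.pyGet? prev w).getD 0) + 1
  else
    (if w > 0 then max ((PySem.List.pyGet? prev w).getD 0)
        ((PySem.List.pyGet? prev (w - 1)).getD 0)
      else (PySem.List.pyGet? prev w).getD 0)

-- A's inner loop builds exactly `arow plum prev`
theorem inner_loop_eq_arow (W : Int) (hW : 0 ≤ W) (plum : Int) (prev : List Int)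
    (hlen : prev.length = (W + 1).toNat) :
    (PySem.List.pyRange 0 (W + 1) 1).foldl
      (fun row w => row ++ [aval plum prev w]) [] = arow plum prev := by
  rw [PySem.List.foldl_append_singleton_eq_map, List.nil_append]
  apply List.ext_getElem
  · simp [PySem.List.length_pyRange_one, arow, length_fgo, hlen]
  · intro i h1 h2
    rw [List.getElem_map, PySem.List.getElem_pyRange_one]
    have hi : i < prev.length := by
      simp [PySem.List.length_pyRange_one] at h1; omega
    rw [show (arow plum prev)[i] = (arow plum prev).getD i 0 from
      (List.getD_eq_getElem _ _ h2).symm]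
    rw [arow, fgo_getD plum 1 (prev.headD 0) prev i hi]
    have hget : (PySem.List.pyGet? prev ((0:Int) + ↑i)).getD 0 = prev.getD i 0 := by
      simp [PySem.List.pyGet?_natCast, List.getD]
    have hpar : (((0:Int) + ↑i) % 2 == 0) = decide (i % 2 = 0) := by
      rcases Nat.mod_two_eq_zero_or_one i with hk | hk <;>
        · simp only [zero_add]
          rw [show ((i:Int)) % 2 = ((i % 2 : Nat) : Int) by omega]
          simp [hk]
    cases i with
    | zero =>
      simp only [aval, hpar, hget]
      cases prev with
      | nil => simp at hi
      | cons x xs =>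
        simp [List.getD]
        split_ifs <;> omega
    | succ j =>
      simp only [aval, hpar, hget]
      have hpos : ((0:Int) + ↑(j + 1)) > 0 := by push_cast; omega
      have hgetm : (PySem.List.pyGet? prev ((0:Int) + ↑(j + 1) - 1)).getD 0 =
          prev.getD j 0 := by
        rw [show (0:Int) + ↑(j + 1) - 1 = ((j : Nat) : Int) by push_cast; ring]
        simp [PySem.List.pyGet?_natCast, List.getD]
      simp only [if_pos hpos, hgetm]
      rcases Nat.mod_two_eq_zero_or_one (j + 1) with hk | hk <;>
        simp [hk] <;> split_ifs <;> omega

-- one outer-loop step of A's port, zeta-reduced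
def stepA (W : Int) (plums : List Int) (dp : List (List Int)) (t : Int) : List (List Int) :=
  dp.set t.toNat ((PySem.List.pyRange 0 (W + 1) 1).foldl
    (fun row w => row ++ [aval ((PySem.List.pyGet? plums (t - 1)).getD 0)
      ((PySem.List.pyGet? dp (t - 1)).getD []) w]) [])

theorem port_eq_fold (T W : Int) (plums : List Int) : max_plums T W plums =
    (PySem.List.max? ((PySem.List.pyGet? ((PySem.List.pyRange 1 (T + 1) 1).foldl
      (stepA W plums)
      (List.replicate (T + 1).toNat (List.replicate (W + 1).toNat 0))) T).getD [])
      (fun x => x)).getD 0 := rfl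

-- A's outer loop: the dp list after the whole loop
theorem outer_loop (T W : Int) (plums : List Int) (hT : 0 ≤ T) (hW : 0 ≤ W)
    (hlen : T ≤ (plums.length : Int)) :
    max_plums T W plums =
      maxD ((plums.take T.toNat).foldl (fun u p => arow p u)
        (List.replicate (W + 1).toNat 0)) := by
  rw [port_eq_fold]
  set n := T.toNat with hn
  set m := (W + 1).toNat with hm
  set zrow : List Int := List.replicate m 0 with hz
  set R : Nat → List Int := fun j => (plums.take j).foldl (fun u p => arow p u) zrow with hR
  have hTn : T = (n : Int) := by omega
  have hRlen : ∀ j, (R j).length = m := by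
    intro j
    simp [hR, hz, length_foldl_arow]
  have hstep : ∀ k : Nat, k < n →
      stepA W plums ((List.range (k + 1)).map R ++ List.replicate (n - k) zrow) ((k : Int) + 1)
        = (List.range (k + 2)).map R ++ List.replicate (n - (k + 1)) zrow := by
    intro k hk
    have hkp : k < plums.length := by omega
    unfold stepA
    have h1 : (k : Int) + 1 - 1 = ((k : Nat) : Int) := by ring
    rw [h1]
    have hprev : (PySem.List.pyGet?
        ((List.range (k + 1)).map R ++ List.replicate (n - k) zrow) ((k : Nat) : Int)).getD []
        = R k := by
      rw [PySem.List.pyGet?_natCast]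
      rw [List.getElem?_append_left (by simp)]
      simp
    have hplum : (PySem.List.pyGet? plums ((k : Nat) : Int)).getD 0 = plums[k] := by
      rw [PySem.List.pyGet?_natCast]
      simp [List.getElem?_eq_getElem hkp]
    rw [hprev, hplum]
    rw [inner_loop_eq_arow W hW plums[k] (R k) (by rw [hRlen k, hm])]
    have htn : ((k : Int) + 1).toNat = k + 1 := by omega
    rw [htn]
    rw [List.set_append]
    have hL : ((List.range (k + 1)).map R).length = k + 1 := by simp
    rw [if_neg (by omega : ¬ (k + 1 < ((List.range (k + 1)).map R).length))]
    rw [hL]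
    have hnk : n - k = (n - (k + 1)) + 1 := by omega
    rw [Nat.sub_self, hnk, List.replicate_succ, List.set_cons_zero]
    have hRsucc : arow plums[k] (R k) = R (k + 1) := by
      rw [hR]
      simp only []
      rw [List.take_add_one, List.getElem?_eq_getElem hkp, Option.toList_some,
        List.foldl_append, List.foldl_cons, List.foldl_nil]
    rw [hRsucc, List.range_succ (n := k + 1)]
    simp
  have key : ∀ (d k : Nat), k + d = n →
      (PySem.List.pyRange ((k : Int) + 1) (T + 1) 1).foldl (stepA W plums)
        ((List.range (k + 1)).map R ++ List.replicate (n - k) zrow)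
      = (List.range (n + 1)).map R := by
    intro d
    induction d with
    | zero =>
      intro k hk
      rw [PySem.List.pyRange_one_eq_nil (by omega : T + 1 ≤ (k : Int) + 1)]
      have : k = n := by omega
      subst this
      simp
    | succ d ihd =>
      intro k hk
      rw [PySem.List.pyRange_one_cons (by omega : (k : Int) + 1 < T + 1), List.foldl_cons]
      rw [hstep k (by omega)]
      have := ihd (k + 1) (by omega)
      rw [show ((k : Int) + 1 + 1) = (((k + 1 : Nat) : Int) + 1) by push_cast; ring]
      exact this
  have hinit : List.replicate (T + 1).toNat zrow
      = (List.range (0 + 1)).map R ++ List.replicate (n - 0) zrow := by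
    have hR0 : R 0 = zrow := by simp [hR]
    have : (T + 1).toNat = n + 1 := by omega
    rw [this, List.range_one, List.map_singleton, hR0, Nat.sub_zero]
    simp [List.replicate_succ]
  rw [hz, hm] at hinit
  rw [hinit, show PySem.List.pyRange 1 (T + 1) 1
      = PySem.List.pyRange (((0 : Nat) : Int) + 1) (T + 1) 1 by norm_num,
    key n 0 (by omega)]
  rw [hTn, PySem.List.pyGet?_natCast]
  rw [List.getElem?_map, List.getElem?_range (by omega : n < n + 1)]
  simp only [Option.map_some, Option.getD_some]
  rw [maxD, hR]

-- ===== abstract DP table and B-side machinery =====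

-- the tree occupied after w moves
def treeC (w : Nat) : Int := if w % 2 = 0 then 1 else 2

-- the catch at time j+1 in column w
def cJ (plums : List Int) (j w : Nat) : Int := if plums.getD j 0 == treeC w then 1 else 0

-- A's dp table as a function (recursion on time)
def Dp (plums : List Int) : Nat → Nat → Int
  | 0, _ => 0
  | j + 1, 0 => Dp plums j 0 + cJ plums j 0
  | j + 1, w + 1 => max (Dp plums j (w + 1)) (Dp plums j w) + cJ plums j (w + 1)

-- prefix count of value v among the first j plums
def cnt (plums : List Int) (v : Int) (j : Nat) : Int := ((plums.take j).count v : Int)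

-- running maximum of Dp · w - P_(w+1) · (the quantity B's inner loop tracks in `best`)
def Mr (plums : List Int) (w : Nat) : Nat → Int
  | 0 => Dp plums 0 w - cnt plums (treeC (w + 1)) 0
  | k + 1 => max (Mr plums w k) (Dp plums (k + 1) w - cnt plums (treeC (w + 1)) (k + 1))

def runMax (g : Nat → Int) : Nat → Int
  | 0 => g 0
  | k + 1 => max (runMax g k) (g (k + 1))

theorem cnt_succ (plums : List Int) (v : Int) (j : Nat) (h : j < plums.length) :
    cnt plums v (j + 1) = cnt plums v j + (if plums.getD j 0 == v then 1 else 0) := by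
  unfold cnt
  rw [List.take_add_one, List.getElem?_eq_getElem h, Option.toList_some, List.count_append]
  rw [List.getD_eq_getElem _ _ h]
  push_cast [List.count_cons, List.count_nil]
  split_ifs <;> simp

theorem Dp_col0 (plums : List Int) : ∀ j, j ≤ plums.length → Dp plums j 0 = cnt plums 1 j := by
  intro j
  induction j with
  | zero => intro _; simp [Dp, cnt]
  | succ j ih =>
    intro h
    rw [Dp, ih (by omega), cnt_succ plums 1 j (by omega)]
    rfl

theorem Dp_key (plums : List Int) (w : Nat) : ∀ k, k < plums.length →
    Dp plums (k + 1) (w + 1) = cnt plums (treeC (w + 1)) (k + 1) + Mr plums w k := by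
  intro k
  induction k with
  | zero =>
    intro h
    rw [show (0 + 1) = 1 from rfl, cnt_succ plums _ 0 h]
    have hc0 : cnt plums (treeC (w + 1)) 0 = 0 := by simp [cnt]
    simp only [Dp, Mr, cJ, hc0]
    split_ifs <;> omega
  | succ k ih =>
    intro h
    rw [show Dp plums (k + 1 + 1) (w + 1)
        = max (Dp plums (k + 1) (w + 1)) (Dp plums (k + 1) w) + cJ plums (k + 1) (w + 1)
      from rfl]
    rw [ih (by omega), cnt_succ plums _ (k + 1) h]
    show _ = _ + Mr plums w (k + 1)
    rw [Mr]
    unfold cJ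
    rw [max_def, max_def]
    split_ifs <;> omega

-- the row of A's table at time j
def Rrow (plums : List Int) (m : Nat) (j : Nat) : List Int :=
  (plums.take j).foldl (fun u p => arow p u) (List.replicate m 0)

theorem Rrow_length (plums : List Int) (m j : Nat) : (Rrow plums m j).length = m := by
  rw [Rrow, length_foldl_arow]; simp

theorem headD_eq_getD (u : List Int) (h : u ≠ []) : u.headD 0 = u.getD 0 0 := by
  cases u with
  | nil => exact absurd rfl h
  | cons a t => rfl

theorem Rrow_getD (plums : List Int) (m : Nat) (hm : 1 ≤ m) :
    ∀ j, j ≤ plums.length → ∀ i, i < m → (Rrow plums m j).getD i 0 = Dp plums j i := by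
  intro j
  induction j with
  | zero =>
    intro _ i hi
    rw [Rrow]
    simp only [List.take_zero, List.foldl_nil]
    rw [List.getD_eq_getElem _ _ (by simp; omega)]
    simp [Dp]
  | succ j ih =>
    intro h i hi
    have hj : j < plums.length := by omega
    have hstep : Rrow plums m (j + 1) = arow plums[j] (Rrow plums m j) := by
      rw [Rrow, Rrow, List.take_add_one, List.getElem?_eq_getElem hj, Option.toList_some,
        List.foldl_append, List.foldl_cons, List.foldl_nil]
    have hlen : (Rrow plums m j).length = m := Rrow_length plums m j
    have hne : Rrow plums m j ≠ [] := by
      intro he; rw [he] at hlen; simp at hlen; omega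
    rw [hstep, arow, fgo_getD plums[j] 1 ((Rrow plums m j).headD 0) _ i (by rw [hlen]; omega)]
    have hpj : plums[j] = plums.getD j 0 := (List.getD_eq_getElem _ _ hj).symm
    cases i with
    | zero =>
      rw [headD_eq_getD _ hne, if_pos rfl, max_self, ih (by omega) 0 hi]
      simp only [Dp, cJ, treeC, hpj]
      norm_num
    | succ i' =>
      rw [if_neg (by omega)]
      rw [show i' + 1 - 1 = i' from rfl]
      rw [ih (by omega) (i' + 1) hi, ih (by omega) i' (by omega)]
      simp only [Dp, cJ, treeC, hpj]
      rcases Nat.mod_two_eq_zero_or_one (i' + 1) with hk | hk <;> simp [hk]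

theorem maxD_append_singleton (a x : Int) (t : List Int) :
    maxD ((a :: t) ++ [x]) = max (maxD (a :: t)) x := by
  rw [List.cons_append, maxD_cons, maxD_cons, List.foldl_append]
  simp

theorem maxD_range_map (g : Nat → Int) : ∀ k, maxD ((List.range (k + 1)).map g) = runMax g k := by
  intro k
  induction k with
  | zero => simp [maxD_cons, runMax]
  | succ k ih =>
    rw [List.range_succ (n := k + 1), List.map_append, List.map_singleton]
    obtain ⟨a, t, ht⟩ := List.exists_cons_of_ne_nil
      (by simp : (List.range (k + 1)).map g ≠ [])
    rw [ht, maxD_append_singleton, ← ht, ih]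
    rfl

-- named loop bodies of port B (the port unfolds to these by rfl)
def preStep (plums : List Int) (st : List Int × List Int × Int × Int) (t : Int) :
    List Int × List Int × Int × Int :=
  let p := (PySem.List.pyGet? plums t).getD 0
  let c1 := if p == 1 then st.2.2.1 + 1 else st.2.2.1
  let c2 := if p == 1 then st.2.2.2 else if p == 2 then st.2.2.2 + 1 else st.2.2.2
  (st.1 ++ [c1], st.2.1 ++ [c2], c1, c2)

def innStep (f P : List Int) (st2 : List Int × Int) (t : Int) : List Int × Int :=
  let g := st2.1 ++ [(PySem.List.pyGet? P t).getD 0 + st2.2]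
  let nb := (PySem.List.pyGet? f t).getD 0 - (PySem.List.pyGet? P t).getD 0
  (g, if nb > st2.2 then nb else st2.2)

def outStep (P1 P2 : List Int) (T : Int) (st : Int × List Int) (w : Int) : Int × List Int :=
  let P := if w % 2 != 0 then P2 else P1
  let inner := (PySem.List.pyRange 1 (T + 1) 1).foldl (innStep st.2 P)
    ([0], (PySem.List.pyGet? st.2 0).getD 0 - (PySem.List.pyGet? P 0).getD 0)
  (max st.1 ((PySem.List.pyGet? inner.1 T).getD 0), inner.1)

theorem altB_eq (T W : Int) (plums : List Int) :
    max_plums_alt T W plums =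
      (let pre := (PySem.List.pyRange 0 T 1).foldl (preStep plums) ([0], [0], 0, 0)
       ((PySem.List.pyRange 1 (W + 1) 1).foldl (outStep pre.1 pre.2.1 T)
         ((PySem.List.pyGet? pre.1 T).getD 0, pre.1)).1) := rfl

theorem getD_map_range (g : Nat → Int) (n k : Nat) (h : k ≤ n) :
    (PySem.List.pyGet? ((List.range (n + 1)).map g) ((k : Nat) : Int)).getD 0 = g k := by
  rw [PySem.List.pyGet?_natCast, List.getElem?_map, List.getElem?_range (by omega)]
  simp

theorem getD_map_range_zero (g : Nat → Int) (n : Nat) :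
    (PySem.List.pyGet? ((List.range (n + 1)).map g) 0).getD 0 = g 0 := by
  have h := getD_map_range g n 0 (by omega)
  rwa [Nat.cast_zero] at h

-- pre-loop: the prefix-count lists
theorem pre_fold (plums : List Int) (T : Int) (n : Nat) (hn : (n : Int) = T)
    (hlen : n ≤ plums.length) :
    (PySem.List.pyRange 0 T 1).foldl (preStep plums) ([0], [0], 0, 0)
      = ((List.range (n + 1)).map (cnt plums 1), (List.range (n + 1)).map (cnt plums 2),
          cnt plums 1 n, cnt plums 2 n) := by
  have key : ∀ (d k : Nat), k + d = n →
      (PySem.List.pyRange ((k : Nat) : Int) T 1).foldl (preStep plums)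
        ((List.range (k + 1)).map (cnt plums 1), (List.range (k + 1)).map (cnt plums 2),
          cnt plums 1 k, cnt plums 2 k)
      = ((List.range (n + 1)).map (cnt plums 1), (List.range (n + 1)).map (cnt plums 2),
          cnt plums 1 n, cnt plums 2 n) := by
    intro d
    induction d with
    | zero =>
      intro k hk
      have hkn : k = n := by omega
      subst hkn
      rw [PySem.List.pyRange_one_eq_nil (by omega)]
      rfl
    | succ d ihd =>
      intro k hk
      have hkn : k < n := by omega
      have hkp : k < plums.length := by omega
      rw [PySem.List.pyRange_one_cons (by omega), List.foldl_cons]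
      have hstep : preStep plums
          ((List.range (k + 1)).map (cnt plums 1), (List.range (k + 1)).map (cnt plums 2),
            cnt plums 1 k, cnt plums 2 k) ((k : Nat) : Int)
          = ((List.range (k + 2)).map (cnt plums 1), (List.range (k + 2)).map (cnt plums 2),
              cnt plums 1 (k + 1), cnt plums 2 (k + 1)) := by
        unfold preStep
        have hp : (PySem.List.pyGet? plums ((k : Nat) : Int)).getD 0 = plums.getD k 0 := by
          rw [PySem.List.pyGet?_natCast]
          simp [List.getD]
        simp only [hp]
        have hc1 : (if plums.getD k 0 == 1 then cnt plums 1 k + 1 else cnt plums 1 k)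
            = cnt plums 1 (k + 1) := by
          rw [cnt_succ plums 1 k hkp]; split_ifs <;> omega
        have hc2 : (if plums.getD k 0 == 1 then cnt plums 2 k
              else if plums.getD k 0 == 2 then cnt plums 2 k + 1 else cnt plums 2 k)
            = cnt plums 2 (k + 1) := by
          rw [cnt_succ plums 2 k hkp]
          by_cases h1 : plums.getD k 0 = 1
          · rw [if_pos (show (plums.getD k 0 == 1) = true by simp only [beq_iff_eq]; omega),
              if_neg (show ¬ ((plums.getD k 0 == 2) = true) by simp only [beq_iff_eq]; omega)]
            omega
          · by_cases h2 : plums.getD k 0 = 2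
            · rw [if_neg (show ¬ ((plums.getD k 0 == 1) = true) by simp only [beq_iff_eq]; omega),
                if_pos (show (plums.getD k 0 == 2) = true by simp only [beq_iff_eq]; omega),
                if_pos (show (plums.getD k 0 == 2) = true by simp only [beq_iff_eq]; omega)]
            · rw [if_neg (show ¬ ((plums.getD k 0 == 1) = true) by simp only [beq_iff_eq]; omega),
                if_neg (show ¬ ((plums.getD k 0 == 2) = true) by simp only [beq_iff_eq]; omega),
                if_neg (show ¬ ((plums.getD k 0 == 2) = true) by simp only [beq_iff_eq]; omega)]
              omega
        rw [hc1, hc2, List.range_succ (n := k + 1), List.map_append, List.map_append]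
        rfl
      rw [hstep, show ((k : Nat) : Int) + 1 = (((k + 1 : Nat) : Nat) : Int) by push_cast; ring]
      exact ihd (k + 1) (by omega)
  have hinit : (([0], [0], 0, 0) : List Int × List Int × Int × Int)
      = ((List.range 1).map (cnt plums 1), (List.range 1).map (cnt plums 2),
          cnt plums 1 0, cnt plums 2 0) := by
    simp [cnt]
  have h0 := key n 0 (by omega)
  rw [Nat.cast_zero] at h0
  rw [hinit]
  exact h0

-- inner loop: from column w to column w+1 by the running maximum
theorem inner_fold (plums : List Int) (T : Int) (n : Nat) (hn : (n : Int) = T)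
    (hlen : n ≤ plums.length) (w : Nat) (f P : List Int)
    (hf : f = (List.range (n + 1)).map (fun j => Dp plums j w))
    (hP : P = (List.range (n + 1)).map (cnt plums (treeC (w + 1)))) :
    (PySem.List.pyRange 1 (T + 1) 1).foldl (innStep f P)
      ([0], (PySem.List.pyGet? f 0).getD 0 - (PySem.List.pyGet? P 0).getD 0)
    = ((List.range (n + 1)).map (fun j => Dp plums j (w + 1)), Mr plums w n) := by
  have key : ∀ (d k : Nat), k + d = n →
      (PySem.List.pyRange (((k : Nat) : Int) + 1) (T + 1) 1).foldl (innStep f P)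
        ((List.range (k + 1)).map (fun j => Dp plums j (w + 1)), Mr plums w k)
      = ((List.range (n + 1)).map (fun j => Dp plums j (w + 1)), Mr plums w n) := by
    intro d
    induction d with
    | zero =>
      intro k hk
      have hkn : k = n := by omega
      subst hkn
      rw [PySem.List.pyRange_one_eq_nil (by omega)]
      rfl
    | succ d ihd =>
      intro k hk
      have hkn : k < n := by omega
      rw [PySem.List.pyRange_one_cons (by omega), List.foldl_cons]
      have hstep : innStep f P
          ((List.range (k + 1)).map (fun j => Dp plums j (w + 1)), Mr plums w k)
          (((k : Nat) : Int) + 1)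
          = ((List.range (k + 2)).map (fun j => Dp plums j (w + 1)), Mr plums w (k + 1)) := by
        unfold innStep
        rw [show ((k : Nat) : Int) + 1 = (((k + 1 : Nat) : Nat) : Int) by push_cast; ring]
        rw [hf, hP, getD_map_range _ n (k + 1) (by omega),
          getD_map_range _ n (k + 1) (by omega)]
        have hDk : cnt plums (treeC (w + 1)) (k + 1) + Mr plums w k
            = Dp plums (k + 1) (w + 1) := (Dp_key plums w k (by omega)).symm
        have hbest : (if Dp plums (k + 1) w - cnt plums (treeC (w + 1)) (k + 1) > Mr plums w k
              then Dp plums (k + 1) w - cnt plums (treeC (w + 1)) (k + 1) else Mr plums w k)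
            = Mr plums w (k + 1) := by
          rw [Mr, max_def]
          split_ifs <;> omega
        simp only [hDk, hbest]
        rw [List.range_succ (n := k + 1), List.map_append]
        rfl
      rw [hstep, show ((k : Nat) : Int) + 1 + 1 = (((k + 1 : Nat) : Nat) : Int) + 1
        by push_cast; ring]
      exact ihd (k + 1) (by omega)
  have hinit : (([0], (PySem.List.pyGet? f 0).getD 0 - (PySem.List.pyGet? P 0).getD 0)
        : List Int × Int)
      = ((List.range 1).map (fun j => Dp plums j (w + 1)), Mr plums w 0) := by
    rw [hf, hP, getD_map_range_zero, getD_map_range_zero, Mr]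
    rfl
  have h0 := key n 0 (by omega)
  rw [Nat.cast_zero, zero_add] at h0
  rw [hinit]
  exact h0

-- outer loop: running answer over the columns
theorem outer_fold (plums : List Int) (T W : Int) (n q : Nat) (hn : (n : Int) = T)
    (hq : q = W.toNat) (hW : 0 ≤ W) (hlen : n ≤ plums.length) (P1 P2 : List Int)
    (hP1 : P1 = (List.range (n + 1)).map (cnt plums 1))
    (hP2 : P2 = (List.range (n + 1)).map (cnt plums 2)) :
    ((PySem.List.pyRange 1 (W + 1) 1).foldl (outStep P1 P2 T)
      (runMax (Dp plums n) 0, (List.range (n + 1)).map (fun j => Dp plums j 0))).1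
    = runMax (Dp plums n) q := by
  have hqW : (q : Int) = W := by omega
  have key : ∀ (d k : Nat), k + d = q →
      (PySem.List.pyRange (((k : Nat) : Int) + 1) (W + 1) 1).foldl (outStep P1 P2 T)
        (runMax (Dp plums n) k, (List.range (n + 1)).map (fun j => Dp plums j k))
      = (runMax (Dp plums n) q, (List.range (n + 1)).map (fun j => Dp plums j q)) := by
    intro d
    induction d with
    | zero =>
      intro k hk
      have hkq : k = q := by omega
      subst hkq
      rw [PySem.List.pyRange_one_eq_nil (by omega)]
      rfl
    | succ d ihd =>
      intro k hk
      have hkq : k < q := by omega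
      rw [PySem.List.pyRange_one_cons (by omega), List.foldl_cons]
      have hstep : outStep P1 P2 T
          (runMax (Dp plums n) k, (List.range (n + 1)).map (fun j => Dp plums j k))
          (((k : Nat) : Int) + 1)
          = (runMax (Dp plums n) (k + 1),
              (List.range (n + 1)).map (fun j => Dp plums j (k + 1))) := by
        unfold outStep
        have hmod : (((k : Nat) : Int) + 1) % 2 = (((k + 1) % 2 : Nat) : Int) := by
          push_cast; omega
        have hPsel : (if ((((k : Nat) : Int) + 1) % 2 != 0) = true then P2 else P1)
            = (List.range (n + 1)).map (cnt plums (treeC (k + 1))) := by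
          rw [hmod]
          rcases Nat.mod_two_eq_zero_or_one (k + 1) with hk2 | hk2 <;>
            simp [hk2, treeC, hP1, hP2]
        simp only [hPsel]
        rw [inner_fold plums T n hn hlen k _ _ rfl rfl]
        rw [show T = ((n : Nat) : Int) from hn.symm,
          getD_map_range (fun j => Dp plums j (k + 1)) n n (by omega)]
        rfl
      rw [hstep, show ((k : Nat) : Int) + 1 + 1 = (((k + 1 : Nat) : Nat) : Int) + 1
        by push_cast; ring]
      exact ihd (k + 1) (by omega)
  have h0 := key q 0 (by omega)
  rw [Nat.cast_zero, zero_add] at h0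
  rw [h0]

-- ===== VERDICT (by name: the statement is the Claim_ definition above) =====
theorem max_plums_spec : Claim_equal_max_plums := by
  intro T W plums _hdom hpre
  obtain ⟨hT, hW, hlen⟩ := hpre
  unfold Spec_max_plums
  set n := T.toNat with hndef
  set q := W.toNat with hqdef
  have hn : (n : Int) = T := by omega
  have hlen' : n ≤ plums.length := by omega
  have hm : (W + 1).toNat = q + 1 := by omega
  -- A side: the last row of the table is the list of Dp n values
  rw [outer_loop T W plums hT hW hlen]
  have hrow : (plums.take T.toNat).foldl (fun u p => arow p u)
      (List.replicate (W + 1).toNat 0) = Rrow plums (q + 1) n := by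
    rw [Rrow, hm]
  rw [hrow]
  have hRmap : Rrow plums (q + 1) n = (List.range (q + 1)).map (fun i => Dp plums n i) := by
    apply List.ext_getElem
    · rw [Rrow_length]; simp
    · intro i h1 h2
      rw [List.getElem_map, List.getElem_range]
      have hi : i < q + 1 := by rw [Rrow_length] at h1; omega
      rw [show (Rrow plums (q + 1) n)[i] = (Rrow plums (q + 1) n).getD i 0 from
        (List.getD_eq_getElem _ _ h1).symm]
      exact Rrow_getD plums (q + 1) (by omega) n hlen' i hi
  rw [hRmap, show maxD ((List.range (q + 1)).map (fun i => Dp plums n i))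
      = runMax (Dp plums n) q from maxD_range_map _ q]
  -- B side
  rw [altB_eq]
  simp only []
  rw [pre_fold plums T n hn hlen']
  dsimp only
  have hcol0 : (List.range (n + 1)).map (cnt plums 1)
      = (List.range (n + 1)).map (fun j => Dp plums j 0) := by
    apply List.map_congr_left
    intro j hj
    rw [List.mem_range] at hj
    exact (Dp_col0 plums j (by omega)).symm
  have hans0 : (PySem.List.pyGet? ((List.range (n + 1)).map (cnt plums 1)) T).getD 0
      = runMax (Dp plums n) 0 := by
    rw [show T = ((n : Nat) : Int) from hn.symm, getD_map_range _ n n (by omega)]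
    rw [runMax, Dp_col0 plums n hlen']
  have hinit2 : (((PySem.List.pyGet? ((List.range (n + 1)).map (cnt plums 1)) T).getD 0),
        (List.range (n + 1)).map (cnt plums 1))
      = (runMax (Dp plums n) 0, (List.range (n + 1)).map (fun j => Dp plums j 0)) := by
    rw [hans0, hcol0]
  rw [hinit2]
  exact (outer_fold plums T W n q hn rfl hW hlen' _ _ rfl rfl).symm
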